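-- pv_equiv track=rewrite | github.com/greece-lover/steemapps-monitor | reporter/aggregation.py | _longest_failure_streak
-- ===== SOURCE A (Python) =====
-- def _longest_failure_streak(rows: list[dict]) -> int:
--     """Length of the longest consecutive run of failed ticks in the list."""
--     longest = 0
--     current = 0
--     for r in rows:
--         if not r["success"]:
--             current += 1
--             longest = max(longest, current)
--         else:
--             current = 0
--     return longest
-- ===== SOURCE B (Python) =====
-- def _longest_failure_streak(rows: list[dict]) -> int:
--     """Length of the longest consecutive run of failed ticks in the list."""
--     flags = [not r["success"] for r in rows]
--     best = 0
--     i, n = 0, len(flags)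
--     while i < n:
--         if flags[i]:
--             j = i + 1
--             while j < n and flags[j]:
--                 j += 1
--             best = max(best, j - i)
--             i = j
--         else:
--             i += 1
--     return best
-- ===== Notes on version B (the rewrite author's own statement) =====
-- stated objective: alternative
-- what changed: B first materialises the failure flags, then finds each maximal failure run with a two-pointer scan (inner loop to the run's end) and takes the max run length, instead of A's single rolling current/longest counter.
import Mathlib
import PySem

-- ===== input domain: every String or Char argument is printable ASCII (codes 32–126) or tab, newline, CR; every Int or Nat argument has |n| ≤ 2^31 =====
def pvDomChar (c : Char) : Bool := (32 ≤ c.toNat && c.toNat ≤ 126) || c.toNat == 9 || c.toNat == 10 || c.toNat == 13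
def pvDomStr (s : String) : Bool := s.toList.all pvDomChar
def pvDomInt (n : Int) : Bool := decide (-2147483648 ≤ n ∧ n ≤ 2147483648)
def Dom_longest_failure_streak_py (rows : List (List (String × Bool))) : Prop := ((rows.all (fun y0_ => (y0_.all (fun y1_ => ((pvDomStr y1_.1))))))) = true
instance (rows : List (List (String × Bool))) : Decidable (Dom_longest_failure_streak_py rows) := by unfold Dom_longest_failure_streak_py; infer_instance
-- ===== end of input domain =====

-- B replaces A's rolling current/longest counter with an explicit maximal-run scan (two pointers
-- over the precomputed failure flags), taking the max run length; same O(n) cost, different decomposition.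


-- ===== PORT A =====
-- A's loop step on state (longest, current); the lookup's getD default is irrelevant:
-- Pre_ guarantees the "success" key is present (Python raises KeyError otherwise).
def pvStepA (st : Int × Int) (f : Bool) : Int × Int :=
  if f then (max st.1 (st.2 + 1), st.2 + 1) else (st.1, 0)

def longest_failure_streak_py (rows : List (List (String × Bool))) : Int :=
  (rows.foldl (fun st r => pvStepA st (!(((PySem.Dict.mk r).get? "success").getD true)))
    ((0 : Int), (0 : Int))).1

-- ===== PORT B =====
-- `flags = [not r["success"] for r in rows]`
def pvFlag (r : List (String × Bool)) : Bool := !(((PySem.Dict.mk r).get? "success").getD true)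

-- outer while-loop of Source B: the inner `while j < n and flags[j]` scan is the takeWhile,
-- advancing `i` to `j` is the dropWhile of the same run
def pvAltLoop : List Bool → Int → Int
  | [], best => best
  | f :: rest, best =>
    if f then
      pvAltLoop (rest.dropWhile id) (max best (((rest.takeWhile id).length : Int) + 1))
    else
      pvAltLoop rest best
termination_by flags _ => flags.length
decreasing_by
  · have := List.length_dropWhile_le (p := id) (l := rest); simp; omega
  · simp

def longest_failure_streak_py_alt (rows : List (List (String × Bool))) : Int :=
  pvAltLoop (rows.map pvFlag) 0

-- ===== PRECONDITION & SPEC =====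
-- Pre_ excludes exactly the rows without a "success" key, on which A raises KeyError.
def Pre_longest_failure_streak_py (rows : List (List (String × Bool))) : Prop :=
  ∀ r ∈ rows, (PySem.Dict.mk r).contains "success" = true
instance (rows : List (List (String × Bool))) : Decidable (Pre_longest_failure_streak_py rows) := by
  unfold Pre_longest_failure_streak_py; infer_instance

def pvWitness_longest_failure_streak_py : (List (List (String × Bool))) :=
  [[("success", true)], [("success", false)], [("success", false)]]

def Spec_longest_failure_streak_py (rows : List (List (String × Bool))) (out : Int) : Prop := out = longest_failure_streak_py_alt rows
instance (rows : List (List (String × Bool))) (out : Int) : Decidable (Spec_longest_failure_streak_py rows out) := by unfold Spec_longest_failure_streak_py; infer_instance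

-- ===== CLAIM (what is proved, stated in full; the proofs are below) =====
def Claim_equal_longest_failure_streak_py : Prop := ∀ (rows : List (List (String × Bool))), Dom_longest_failure_streak_py rows → Pre_longest_failure_streak_py rows → Spec_longest_failure_streak_py rows (longest_failure_streak_py rows)

-- ===== LEMMAS AND PROOFS =====

-- a run of m+1 trues pushes current to c+m+1 and longest to max l (c+m+1)
theorem pvStepA_run (m : ℕ) : ∀ (rest : List Bool) (l c : Int),
    (List.replicate (m + 1) true ++ rest).foldl pvStepA (l, c)
      = rest.foldl pvStepA (max l (c + (m : Int) + 1), c + (m : Int) + 1) := by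
  induction m with
  | zero => intro rest l c; simp [pvStepA]
  | succ m ih =>
    intro rest l c
    have h : List.replicate (m + 2) true ++ rest = true :: (List.replicate (m + 1) true ++ rest) := by
      simp [List.replicate_succ]
    rw [h]
    simp only [List.foldl_cons, pvStepA, reduceIte]
    rw [ih]
    congr 1
    simp only [Prod.mk.injEq]
    constructor <;> (push_cast; omega)

theorem takeWhile_id_replicate (l : List Bool) :
    l.takeWhile id = List.replicate (l.takeWhile id).length true := by
  rw [List.eq_replicate_iff]
  refine ⟨rfl, fun b hb => ?_⟩
  have := List.mem_takeWhile_imp hb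
  simpa using this

theorem dropWhile_id_head (l : List Bool) (b : Bool) (t : List Bool)
    (h : l.dropWhile id = b :: t) : b = false := by
  have := List.head?_dropWhile_not (p := id) l
  rw [h] at this
  simpa using this

theorem pvMain : ∀ (n : ℕ) (flags : List Bool), flags.length ≤ n →
    ∀ best : Int, (flags.foldl pvStepA (best, 0)).1 = pvAltLoop flags best := by
  intro n
  induction n with
  | zero =>
    intro flags h best
    have : flags = [] := List.eq_nil_of_length_eq_zero (Nat.le_zero.mp h)
    subst this; simp [pvAltLoop]
  | succ n ih =>
    intro flags h best
    match flags with
    | [] => simp [pvAltLoop]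
    | false :: t =>
      simp only [List.foldl_cons, pvStepA, pvAltLoop, Bool.false_eq_true, reduceIte]
      exact ih t (by simpa using h) best
    | true :: t =>
      have hdecomp : true :: t
          = List.replicate ((t.takeWhile id).length + 1) true ++ t.dropWhile id := by
        conv_lhs => rw [show t = t.takeWhile id ++ t.dropWhile id from
          (List.takeWhile_append_dropWhile).symm]
        rw [List.replicate_succ]
        congr 2
        exact takeWhile_id_replicate t
      have halt : pvAltLoop (true :: t) best
          = pvAltLoop (t.dropWhile id) (max best (((t.takeWhile id).length : Int) + 1)) := by
        simp [pvAltLoop]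
      have hfold : ((true :: t).foldl pvStepA (best, 0))
          = (t.dropWhile id).foldl pvStepA
              (max best (((t.takeWhile id).length : Int) + 1),
               ((t.takeWhile id).length : Int) + 1) := by
        conv_lhs => rw [hdecomp]
        rw [pvStepA_run]
        norm_num
      rw [hfold, halt]
      have hdt : (t.dropWhile id).length ≤ t.length := List.length_dropWhile_le id t
      cases hD : t.dropWhile id with
      | nil => simp [pvAltLoop]
      | cons b d' =>
        have hb : b = false := dropWhile_id_head t b d' hD
        subst hb
        simp only [List.foldl_cons, pvStepA, pvAltLoop, Bool.false_eq_true, reduceIte]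
        have hlen : d'.length ≤ n := by
          rw [hD] at hdt
          simp at hdt
          simp at h
          omega
        exact ih d' hlen _

-- ===== VERDICT (by name: the statement is the Claim_ definition above) =====
theorem longest_failure_streak_py_spec : Claim_equal_longest_failure_streak_py := by
  intro rows _ _
  unfold Spec_longest_failure_streak_py longest_failure_streak_py longest_failure_streak_py_alt
  show (rows.foldl (fun st r => pvStepA st (pvFlag r)) ((0 : Int), (0 : Int))).1
      = pvAltLoop (rows.map pvFlag) 0
  rw [← List.foldl_map (f := pvFlag) (g := pvStepA)]
  exact pvMain (rows.map pvFlag).length _ le_rfl 0
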